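-- pv_equiv track=rewrite | github.com/vladrotariu1/laborator-python | lab2/4-sing-the-song.py | sing_the_song
-- ===== SOURCE A (Python) =====
-- def sing_the_song(notes_list, singed_notes_list, start_note_index):
--     number_of_notes = len(notes_list)
--
--     song = [notes_list[start_note_index]]
--     current_note_index = start_note_index
--
--     for new_note_index in singed_notes_list:
--         current_note_index = (current_note_index + new_note_index) % number_of_notes
--         song.append(notes_list[current_note_index])
--
--     return song
-- ===== SOURCE B (Python) =====
-- def sing_the_song(notes_list, singed_notes_list, start_note_index):
--     number_of_notes = len(notes_list)
--
--     # walk the positions BACKWARDS from the grand total, building the tail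
--     # of the song back-to-front by subtracting each step
--     position = start_note_index + sum(singed_notes_list)
--     song_tail = []
--     for step in reversed(singed_notes_list):
--         song_tail.append(notes_list[position % number_of_notes])
--         position -= step
--     song_tail.reverse()
--
--     return [notes_list[start_note_index]] + song_tail
-- ===== Notes on version B (the rewrite author's own statement) =====
-- stated objective: alternative
-- what changed: B traverses the steps in reverse: it computes the grand total once with sum(), then walks the positions backwards by subtraction, building the song's tail back-to-front and reversing it, instead of A's forward loop carrying a running re-modded index and appending as it goes.
import Mathlib
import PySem

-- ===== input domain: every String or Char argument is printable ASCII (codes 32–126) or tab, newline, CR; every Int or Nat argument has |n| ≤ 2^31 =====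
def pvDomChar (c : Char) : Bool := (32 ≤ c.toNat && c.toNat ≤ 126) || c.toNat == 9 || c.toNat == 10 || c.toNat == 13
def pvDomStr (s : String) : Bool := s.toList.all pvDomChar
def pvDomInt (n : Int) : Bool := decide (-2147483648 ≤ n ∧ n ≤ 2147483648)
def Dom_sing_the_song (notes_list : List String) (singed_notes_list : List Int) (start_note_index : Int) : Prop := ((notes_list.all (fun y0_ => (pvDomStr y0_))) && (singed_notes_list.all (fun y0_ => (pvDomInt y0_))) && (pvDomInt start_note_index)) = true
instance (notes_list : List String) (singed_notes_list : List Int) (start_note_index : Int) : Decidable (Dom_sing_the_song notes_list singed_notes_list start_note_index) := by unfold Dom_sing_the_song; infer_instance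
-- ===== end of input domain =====

-- B walks the positions backwards from the grand total (sum once, subtract step by step,
-- build the tail back-to-front and reverse) instead of A's forward accumulator loop
-- (objective: alternative decomposition, same cost).

-- ===== PORT A =====
-- literal port of A: one forward loop carrying (song, current_note_index), re-modding each step
def sing_the_song (notes_list : List String) (singed_notes_list : List Int) (start_note_index : Int) : List String :=
  let number_of_notes : Int := notes_list.length
  let song : List String := [(PySem.List.pyGet? notes_list start_note_index).getD ""]
  (singed_notes_list.foldl
    (fun (st : List String × Int) new_note_index =>
      let current : Int := PySem.Int.mod (st.2 + new_note_index) number_of_notes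
      (st.1 ++ [(PySem.List.pyGet? notes_list current).getD ""], current))
    (song, start_note_index)).1

-- ===== PORT B =====
-- literal port of Source B: sum once, iterate the steps in reverse subtracting, then reverse the tail
def sing_the_song_alt (notes_list : List String) (singed_notes_list : List Int) (start_note_index : Int) : List String :=
  let number_of_notes : Int := notes_list.length
  let position : Int := start_note_index + singed_notes_list.sum
  let song_tail : List String :=
    (singed_notes_list.reverse.foldl
      (fun (st : List String × Int) step =>
        (st.1 ++ [(PySem.List.pyGet? notes_list (PySem.Int.mod st.2 number_of_notes)).getD ""], st.2 - step))
      ([], position)).1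
  [(PySem.List.pyGet? notes_list start_note_index).getD ""] ++ song_tail.reverse

-- ===== PRECONDITION & SPEC =====
-- Pre_ excludes exactly the inputs where A raises IndexError on notes_list[start_note_index]
-- (in particular an empty notes_list); B raises on those inputs too.
def Pre_sing_the_song (notes_list : List String) (singed_notes_list : List Int) (start_note_index : Int) : Prop :=
  PySem.Raise.InRange notes_list.length start_note_index
instance (notes_list : List String) (singed_notes_list : List Int) (start_note_index : Int) : Decidable (Pre_sing_the_song notes_list singed_notes_list start_note_index) := by unfold Pre_sing_the_song; infer_instance
def pvWitness_sing_the_song : List String × List Int × Int := (["do", "re", "mi"], [2, 5, -1], -2)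

def Spec_sing_the_song (notes_list : List String) (singed_notes_list : List Int) (start_note_index : Int) (out : List String) : Prop := out = sing_the_song_alt notes_list singed_notes_list start_note_index
instance (notes_list : List String) (singed_notes_list : List Int) (start_note_index : Int) (out : List String) : Decidable (Spec_sing_the_song notes_list singed_notes_list start_note_index out) := by unfold Spec_sing_the_song; infer_instance

-- ===== CLAIM (what is proved, stated in full; the proofs are below) =====
def Claim_equal_sing_the_song : Prop := ∀ (notes_list : List String) (singed_notes_list : List Int) (start_note_index : Int), Dom_sing_the_song notes_list singed_notes_list start_note_index → Pre_sing_the_song notes_list singed_notes_list start_note_index → Spec_sing_the_song notes_list singed_notes_list start_note_index (sing_the_song notes_list singed_notes_list start_note_index)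

-- ===== LEMMAS AND PROOFS =====

-- the raw prefix sums t+d1, t+d1+d2, … — the common reference point of both proofs
def psums : List Int → Int → List Int
  | [], _ => []
  | d :: rest, t => (t + d) :: psums rest (t + d)

-- A's forward fold from (song, c) equals song ++ the modular lookups of the raw prefix
-- sums from t, whenever c and t are congruent modulo the (positive) list length
lemma loop_eq (nl : List String) (hn : nl ≠ []) :
    ∀ (sl : List Int) (song : List String) (c t : Int),
    PySem.Int.mod c (nl.length : Int) = PySem.Int.mod t (nl.length : Int) →
    (sl.foldl
      (fun (st : List String × Int) d =>
        let current : Int := PySem.Int.mod (st.2 + d) (nl.length : Int)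
        (st.1 ++ [(PySem.List.pyGet? nl current).getD ""], current))
      (song, c)).1
      = song ++ (psums sl t).map
          (fun s => (PySem.List.pyGet? nl (PySem.Int.mod s (nl.length : Int))).getD "") := by
  have hpos : (0 : Int) < (nl.length : Int) := by
    have := List.length_pos_iff.mpr hn; exact_mod_cast this
  intro sl
  induction sl with
  | nil => intro song c t _; simp [psums]
  | cons d sl ih =>
    intro song c t hct
    have hmod : PySem.Int.mod (c + d) (nl.length : Int) = PySem.Int.mod (t + d) (nl.length : Int) := by
      simp only [PySem.Int.mod_eq_emod_of_pos hpos] at hct ⊢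
      rw [← Int.emod_add_emod c _ d, ← Int.emod_add_emod t _ d, hct]
    have hidem : PySem.Int.mod (PySem.Int.mod (c + d) (nl.length : Int)) (nl.length : Int)
        = PySem.Int.mod (t + d) (nl.length : Int) := by
      rw [← hmod]
      simp only [PySem.Int.mod_eq_emod_of_pos hpos]
      exact Int.emod_emod_of_dvd _ dvd_rfl
    simp only [List.foldl_cons, psums, List.map_cons]
    rw [ih (song ++ [(PySem.List.pyGet? nl (PySem.Int.mod (c + d) (nl.length : Int))).getD ""])
        (PySem.Int.mod (c + d) (nl.length : Int)) (t + d) hidem]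
    simp [hmod]

-- B's backward walk, written as a foldr, produces exactly the reversed lookups of the
-- raw prefix sums together with the start value it subtracted back down to
lemma back_eq (nl : List String) :
    ∀ (sl : List Int) (t : Int),
    (sl.foldr
      (fun d (st : List String × Int) =>
        (st.1 ++ [(PySem.List.pyGet? nl (PySem.Int.mod st.2 (nl.length : Int))).getD ""], st.2 - d))
      ([], t + sl.sum))
      = (((psums sl t).map
            (fun s => (PySem.List.pyGet? nl (PySem.Int.mod s (nl.length : Int))).getD "")).reverse, t) := by
  intro sl
  induction sl with
  | nil => intro t; simp [psums]
  | cons d rest ih =>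
    intro t
    have harith : t + (d :: rest).sum = (t + d) + rest.sum := by simp [List.sum_cons]; ring
    simp only [List.foldr_cons, harith, ih (t + d), psums, List.map_cons, List.reverse_cons]
    simp

-- ===== VERDICT (by name: the statement is the Claim_ definition above) =====
theorem sing_the_song_spec : Claim_equal_sing_the_song := by
  intro nl sl s _ hpre
  have hn : nl ≠ [] := by
    rcases nl with _ | _
    · exact absurd hpre (by simp [Pre_sing_the_song, PySem.Raise.InRange])
    · simp
  unfold Spec_sing_the_song sing_the_song sing_the_song_alt
  simp only [List.foldl_reverse]
  have hb := back_eq nl sl s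
  have hA := loop_eq nl hn sl [(PySem.List.pyGet? nl s).getD ""] s s rfl
  simp only [hA]
  -- align the foldr in hb with the one produced by foldl_reverse
  have : (sl.foldr
      (fun d (st : List String × Int) =>
        (st.1 ++ [(PySem.List.pyGet? nl (PySem.Int.mod st.2 (nl.length : Int))).getD ""], st.2 - d))
      ([], s + sl.sum)).1.reverse
      = (psums sl s).map
          (fun v => (PySem.List.pyGet? nl (PySem.Int.mod v (nl.length : Int))).getD "") := by
    rw [hb]; simp
  simpa using this.symm
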